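-- pv_equiv track=rewrite | github.com/Jdiepeveencodes/python_healthcare_automation | src/run.py | reasons_to_actions_intake
-- ===== SOURCE A (Python) =====
-- from typing import Any, Dict, List, Tuple
--
-- def reasons_to_actions_intake(reasons: List[str]) -> Tuple[str, str]:
--     """Return (next_action, priority) for intake team."""
--     actions: List[str] = []
--     priority = "MEDIUM"
--
--     if any(r.startswith("DOB_") for r in reasons):
--         actions.append("Correct DOB (MM/DD/YYYY) and re-run intake")
--         priority = "HIGH"
--
--     if any(r.startswith("SERVICE_DATE_") for r in reasons):
--         actions.append("Correct service date (MM/DD/YYYY) and re-run intake")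
--         priority = "HIGH"
--
--     if any(r.startswith("MISSING_") for r in reasons):
--         actions.append("Complete missing required intake fields (demographics/ID/insurance/provider/state)")
--
--     if "PHONE_INVALID_LENGTH" in reasons:
--         actions.append("Verify phone number (10 digits)")
--
--     if not actions:
--         actions.append("Review intake record manually")
--
--     seen = set()
--     actions = [a for a in actions if not (a in seen or seen.add(a))]
--     return " ; ".join(actions), priority
-- ===== SOURCE B (Python) =====
-- from typing import List, Tuple
--
-- def reasons_to_actions_intake(reasons: List[str]) -> Tuple[str, str]:
--     dob = service = missing = phone = False
--     for r in reasons: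
--         if r.startswith("DOB_"):
--             dob = True
--         if r.startswith("SERVICE_DATE_"):
--             service = True
--         if r.startswith("MISSING_"):
--             missing = True
--         if r == "PHONE_INVALID_LENGTH":
--             phone = True
--     actions = []
--     if dob:
--         actions.append("Correct DOB (MM/DD/YYYY) and re-run intake")
--     if service:
--         actions.append("Correct service date (MM/DD/YYYY) and re-run intake")
--     if missing:
--         actions.append("Complete missing required intake fields (demographics/ID/insurance/provider/state)")
--     if phone:
--         actions.append("Verify phone number (10 digits)")
--     if not actions:
--         actions.append("Review intake record manually")
--     priority = "HIGH" if (dob or service) else "MEDIUM"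
--     return " ; ".join(actions), priority
-- ===== Notes on version B (the rewrite author's own statement) =====
-- stated objective: simpler
-- what changed: B replaces A's four separate passes over reasons (two any() generators, a membership scan) and the redundant seen-set dedup pass by a single loop that sets four flags, then assembles the already-unique action strings from the flags.
import Mathlib
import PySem

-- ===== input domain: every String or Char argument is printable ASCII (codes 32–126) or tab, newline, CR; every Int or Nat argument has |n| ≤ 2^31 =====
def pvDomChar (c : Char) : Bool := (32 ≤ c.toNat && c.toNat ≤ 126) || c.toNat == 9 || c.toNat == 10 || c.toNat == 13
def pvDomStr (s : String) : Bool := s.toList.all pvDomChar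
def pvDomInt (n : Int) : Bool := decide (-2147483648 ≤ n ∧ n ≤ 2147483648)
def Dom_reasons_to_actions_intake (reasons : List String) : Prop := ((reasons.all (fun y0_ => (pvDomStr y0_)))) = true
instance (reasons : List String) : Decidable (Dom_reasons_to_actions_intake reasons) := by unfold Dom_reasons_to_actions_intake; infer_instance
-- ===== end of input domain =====

-- B replaces A's four separate passes over `reasons` (and the redundant seen-set dedup pass)
-- by a single loop setting four flags, from which the result is assembled directly (objective: simpler).

-- ===== PORT A =====
def reasons_to_actions_intake (reasons : List String) : String × String :=
  let actions : List String := []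
  let priority : String := "MEDIUM"
  let (actions, priority) :=
    if reasons.any (fun r => PySem.Str.startswith r "DOB_") then
      (actions ++ ["Correct DOB (MM/DD/YYYY) and re-run intake"], "HIGH")
    else (actions, priority)
  let (actions, priority) :=
    if reasons.any (fun r => PySem.Str.startswith r "SERVICE_DATE_") then
      (actions ++ ["Correct service date (MM/DD/YYYY) and re-run intake"], "HIGH")
    else (actions, priority)
  let actions :=
    if reasons.any (fun r => PySem.Str.startswith r "MISSING_") then
      actions ++ ["Complete missing required intake fields (demographics/ID/insurance/provider/state)"]
    else actions
  let actions :=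
    if reasons.contains "PHONE_INVALID_LENGTH" then
      actions ++ ["Verify phone number (10 digits)"]
    else actions
  let actions := if actions.isEmpty then actions ++ ["Review intake record manually"] else actions
  -- seen = set(); actions = [a for a in actions if not (a in seen or seen.add(a))]
  let actions :=
    (actions.foldl
      (fun (st : PySem.Set String × List String) a =>
        if PySem.Set.contains st.1 a then st else (PySem.Set.add st.1 a, st.2 ++ [a]))
      (PySem.Set.empty, [])).2
  (PySem.Str.join " ; " actions, priority)

-- ===== PORT B =====
def reasons_to_actions_intake_alt (reasons : List String) : String × String :=
  let flags :=
    reasons.foldl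
      (fun (st : Bool × Bool × Bool × Bool) r =>
        (if PySem.Str.startswith r "DOB_" then true else st.1,
         if PySem.Str.startswith r "SERVICE_DATE_" then true else st.2.1,
         if PySem.Str.startswith r "MISSING_" then true else st.2.2.1,
         if r == "PHONE_INVALID_LENGTH" then true else st.2.2.2))
      (false, false, false, false)
  let actions : List String := []
  let actions := if flags.1 then actions ++ ["Correct DOB (MM/DD/YYYY) and re-run intake"] else actions
  let actions := if flags.2.1 then actions ++ ["Correct service date (MM/DD/YYYY) and re-run intake"] else actions
  let actions := if flags.2.2.1 then actions ++ ["Complete missing required intake fields (demographics/ID/insurance/provider/state)"] else actions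
  let actions := if flags.2.2.2 then actions ++ ["Verify phone number (10 digits)"] else actions
  let actions := if actions.isEmpty then actions ++ ["Review intake record manually"] else actions
  let priority := if flags.1 || flags.2.1 then "HIGH" else "MEDIUM"
  (PySem.Str.join " ; " actions, priority)

-- ===== PRECONDITION & SPEC =====
def Spec_reasons_to_actions_intake (reasons : List String) (out : String × String) : Prop := out = reasons_to_actions_intake_alt reasons
instance (reasons : List String) (out : String × String) : Decidable (Spec_reasons_to_actions_intake reasons out) := by unfold Spec_reasons_to_actions_intake; infer_instance

-- ===== CLAIM (what is proved, stated in full; the proofs are below) =====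
def Claim_equal_reasons_to_actions_intake : Prop := ∀ (reasons : List String), Dom_reasons_to_actions_intake reasons → Spec_reasons_to_actions_intake reasons (reasons_to_actions_intake reasons)

-- ===== LEMMAS AND PROOFS =====

-- B's flag loop computes exactly the four `any`-style scans of A.
theorem flags_foldl (l : List String) (a b c d : Bool) :
    l.foldl
      (fun (st : Bool × Bool × Bool × Bool) r =>
        (if PySem.Str.startswith r "DOB_" then true else st.1,
         if PySem.Str.startswith r "SERVICE_DATE_" then true else st.2.1,
         if PySem.Str.startswith r "MISSING_" then true else st.2.2.1,
         if r == "PHONE_INVALID_LENGTH" then true else st.2.2.2))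
      (a, b, c, d)
    = (a || l.any (fun r => PySem.Str.startswith r "DOB_"),
       b || l.any (fun r => PySem.Str.startswith r "SERVICE_DATE_"),
       c || l.any (fun r => PySem.Str.startswith r "MISSING_"),
       d || l.contains "PHONE_INVALID_LENGTH") := by
  induction l generalizing a b c d with
  | nil => simp
  | cons x xs ih =>
    simp only [List.foldl_cons, List.any_cons, ih, List.contains_cons]
    refine Prod.ext ?_ (Prod.ext ?_ (Prod.ext ?_ ?_))
    · simp [Bool.or_assoc, Bool.or_left_comm]
    · simp [Bool.or_assoc, Bool.or_left_comm]
    · simp [Bool.or_assoc, Bool.or_left_comm]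
    · rw [BEq.comm (a := x)]
      by_cases h : "PHONE_INVALID_LENGTH" = x
      · simp [h, Bool.or_assoc, Bool.or_left_comm]
      · rw [beq_eq_false_iff_ne.mpr h]
        simp [h, Bool.or_assoc, Bool.or_left_comm]

theorem reasons_to_actions_intake_eq (reasons : List String) :
    reasons_to_actions_intake reasons = reasons_to_actions_intake_alt reasons := by
  unfold reasons_to_actions_intake reasons_to_actions_intake_alt
  rw [flags_foldl]
  simp only [Bool.false_or]
  rcases h1 : reasons.any (fun r => PySem.Str.startswith r "DOB_") <;>
  rcases h2 : reasons.any (fun r => PySem.Str.startswith r "SERVICE_DATE_") <;>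
  rcases h3 : reasons.any (fun r => PySem.Str.startswith r "MISSING_") <;>
  rcases h4 : reasons.contains "PHONE_INVALID_LENGTH" <;>
    (try simp only [h1, h2, h3, h4]) <;> decide

-- ===== VERDICT (by name: the statement is the Claim_ definition above) =====
theorem reasons_to_actions_intake_spec : Claim_equal_reasons_to_actions_intake := by
  intro reasons _
  unfold Spec_reasons_to_actions_intake
  exact reasons_to_actions_intake_eq reasons
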